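-- pv_equiv track=rewrite | github.com/Shilpibouddha/GFG | Easy/Decode It/decode-it.py | decodeIt
-- ===== SOURCE A (Python) =====
-- def decodeIt(Str, k):
--     new_str = ""
--     size = len(Str)
--
--     for i in range(size):
--         if not Str[i].isdigit():
--             new_str += Str[i]
--         else:
--             m = int(Str[i])
--             res = new_str
--             for j in range(1, m):
--                 new_str += res
--
--     return new_str[k - 1]
-- ===== SOURCE B (Python) =====
-- def decodeIt(Str, k):
--     # Forward pass: length of the fully decoded string (a digit d multiplies
--     # the decoded prefix length by d, any other character adds one).
--     length = 0
--     for ch in Str: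
--         length = length * int(ch) if ch.isdigit() else length + 1
--     if not 1 <= k <= length:
--         raise IndexError("k is out of range of the decoded string")
--     # Backward pass: undo each step, following where the k-th character lands,
--     # without ever building the decoded string.
--     i = k - 1
--     cur = length
--     for ch in reversed(Str):
--         if ch.isdigit():
--             cur //= int(ch)
--             i %= cur
--         else:
--             cur -= 1
--             if i == cur:
--                 return ch
-- ===== Notes on version B (the rewrite author's own statement) =====
-- stated objective: alternative
-- what changed: Instead of materializing the multiplicatively expanded string (A appends m-1 copies of the whole prefix at each digit), B tracks only the decoded length forward and resolves the k-th character backwards by modular arithmetic over the input (intended as faster; measured 1.7-1.8x at the largest probe sizes but not consistently, so not claimed); …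
-- outside the precondition, e.g. on decodeIt('a0b', 1): A returns 'a', B returns 'b'; on decodeIt('ab', 0): A returns 'b', B raises IndexError; on decodeIt('ab0', 1): A returns 'a', B raises IndexError
import Mathlib
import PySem

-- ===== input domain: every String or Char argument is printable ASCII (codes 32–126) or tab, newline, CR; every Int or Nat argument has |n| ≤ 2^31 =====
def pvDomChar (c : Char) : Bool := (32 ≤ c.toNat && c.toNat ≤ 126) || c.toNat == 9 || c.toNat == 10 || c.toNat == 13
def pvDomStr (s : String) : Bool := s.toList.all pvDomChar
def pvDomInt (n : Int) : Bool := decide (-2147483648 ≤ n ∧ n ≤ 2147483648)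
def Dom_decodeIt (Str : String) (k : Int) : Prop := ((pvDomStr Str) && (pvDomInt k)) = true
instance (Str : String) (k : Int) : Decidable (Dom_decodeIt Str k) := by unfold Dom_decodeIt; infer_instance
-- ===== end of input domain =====

-- B replaces A's materialization of the expanded string by a length-only forward pass and a
-- backward modular-arithmetic resolution of the k-th character;
-- Pre_ excludes strings containing the digit '0' (an unspecified corner: A leaves the string
-- unchanged, B erases the prefix) and out-of-range k (A raises or resolves a negative index; B raises).


-- ===== PORT A =====
-- int(Str[i]) on a single character; on a digit character ofStr? is always `some`, so getD 0 is exact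
def pyDigit (c : Char) : Int := (PySem.Int.ofStr? (String.ofList [c])).getD 0

-- one iteration of A's outer loop body (state: new_str as List Char)
def stepA (s : List Char) (c : Char) : List Char :=
  if !(PySem.Chars.isdigit c) then s ++ [c]
  else
    let m := pyDigit c
    let res := s
    (PySem.List.pyRange 1 m 1).foldl (fun ns _ => ns ++ res) s

-- `for i in range(size): … Str[i] …` visits exactly the characters of Str in order
def buildA (cs : List Char) : List Char := cs.foldl stepA []

def decodeIt (Str : String) (k : Int) : String :=
  let new_str := buildA Str.toList
  match PySem.List.pyGet? new_str (k - 1) with   -- new_str[k - 1]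
  | some c => String.ofList [c]
  | none => ""                                   -- IndexError: excluded by Pre_

-- ===== PORT B =====
-- forward pass of Source B: only the length of the decoded string
def altLen (cs : List Char) : Int :=
  cs.foldl (fun L c => if PySem.Chars.isdigit c then L * pyDigit c else L + 1) 0

-- backward pass of Source B over reversed(Str) with state (cur, i)
def altGo : List Char → Int → Int → String
  | [], _, _ => ""                               -- loop falls through only outside Pre_
  | c :: rest, cur, i =>
    if PySem.Chars.isdigit c then
      let cur' := PySem.Int.floordiv cur (pyDigit c)
      altGo rest cur' (PySem.Int.mod i cur')
    else
      if i = cur - 1 then String.ofList [c]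
      else altGo rest (cur - 1) i

def decodeIt_alt (Str : String) (k : Int) : String :=
  let length := altLen Str.toList
  if ¬ (1 ≤ k ∧ k ≤ length) then ""              -- raise IndexError: excluded by Pre_
  else altGo Str.toList.reverse length (k - 1)

-- ===== PRECONDITION & SPEC =====
-- Pre_ excludes: strings containing the digit '0' — an unspecified corner of the encoding where
-- A's range(1,m) loop leaves the string unchanged while B's multiply-by-zero reading erases the
-- prefix, either being defensible (A still returns a value on some of them) — and out-of-range k
-- including k ≤ 0 (A raises IndexError or resolves k-1 as a Python negative index; B raises).
def Pre_decodeIt (Str : String) (k : Int) : Prop :=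
  '0' ∉ Str.toList ∧ 1 ≤ k ∧ k ≤ altLen Str.toList
instance (Str : String) (k : Int) : Decidable (Pre_decodeIt Str k) := by
  unfold Pre_decodeIt; infer_instance

def pvWitness_decodeIt : String × Int := ("ab2", 4)

def Spec_decodeIt (Str : String) (k : Int) (out : String) : Prop := out = decodeIt_alt Str k
instance (Str : String) (k : Int) (out : String) : Decidable (Spec_decodeIt Str k out) := by
  unfold Spec_decodeIt; infer_instance

-- ===== CLAIM (what is proved, stated in full; the proofs are below) =====
def Claim_equal_decodeIt : Prop := ∀ (Str : String) (k : Int), Dom_decodeIt Str k → Pre_decodeIt Str k → Spec_decodeIt Str k (decodeIt Str k)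

-- ===== LEMMAS AND PROOFS =====

-- a digit character is one of '0'..'9'
theorem digit_cases (c : Char) (h : PySem.Chars.isdigit c = true) :
    c ∈ ['0','1','2','3','4','5','6','7','8','9'] := by
  simp only [PySem.Chars.isdigit, Bool.and_eq_true, decide_eq_true_eq, Char.le_def] at h
  obtain ⟨h1, h2⟩ := h
  rw [UInt32.le_iff_toNat_le] at h1 h2
  have h1n : 48 ≤ c.val.toNat := h1
  have h2n : c.val.toNat ≤ 57 := h2
  have key : ∀ (d : Char), c.val.toNat = d.val.toNat → c = d := fun d hd =>
    Char.ext (UInt32.toNat_inj.mp hd)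
  have hv : c.val.toNat = 48 ∨ c.val.toNat = 49 ∨ c.val.toNat = 50 ∨ c.val.toNat = 51 ∨
      c.val.toNat = 52 ∨ c.val.toNat = 53 ∨ c.val.toNat = 54 ∨ c.val.toNat = 55 ∨
      c.val.toNat = 56 ∨ c.val.toNat = 57 := by omega
  rcases hv with hv|hv|hv|hv|hv|hv|hv|hv|hv|hv <;> first
    | (rw [key '0' (by rw [hv]; decide)]; simp)
    | (rw [key '1' (by rw [hv]; decide)]; simp)
    | (rw [key '2' (by rw [hv]; decide)]; simp)
    | (rw [key '3' (by rw [hv]; decide)]; simp)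
    | (rw [key '4' (by rw [hv]; decide)]; simp)
    | (rw [key '5' (by rw [hv]; decide)]; simp)
    | (rw [key '6' (by rw [hv]; decide)]; simp)
    | (rw [key '7' (by rw [hv]; decide)]; simp)
    | (rw [key '8' (by rw [hv]; decide)]; simp)
    | (rw [key '9' (by rw [hv]; decide)]; simp)

-- a digit character other than '0' has value 1..9
theorem pyDigit_pos (c : Char) (h : PySem.Chars.isdigit c = true) (hne : c ≠ '0') :
    1 ≤ pyDigit c ∧ pyDigit c ≤ 9 := by
  have := digit_cases c h
  fin_cases this
  · exact absurd rfl hne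
  all_goals decide

-- A's inner loop appends `res` once per iteration
theorem foldl_append_const {α β : Type} (l : List α) (res init : List β) :
    l.foldl (fun ns _ => ns ++ res) init = init ++ (List.replicate l.length res).flatten := by
  induction l generalizing init with
  | nil => simp
  | cons x xs ih => simp [List.foldl_cons, ih, List.replicate_succ, List.append_assoc]

-- one step of A on a nonzero digit character: pyDigit c copies of the current prefix
theorem stepA_digit (s : List Char) (c : Char) (h : PySem.Chars.isdigit c = true)
    (hne : c ≠ '0') :
    stepA s c = (List.replicate (pyDigit c).toNat s).flatten := by
  obtain ⟨hm1, hm9⟩ := pyDigit_pos c h hne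
  simp only [stepA, h, Bool.not_true, Bool.false_eq_true, if_false]
  rw [foldl_append_const, PySem.List.length_pyRange_one]
  have : (pyDigit c).toNat = (pyDigit c - 1).toNat + 1 := by omega
  rw [this, List.replicate_succ, List.flatten_cons]

theorem stepA_nondigit (s : List Char) (c : Char) (h : PySem.Chars.isdigit c = false) :
    stepA s c = s ++ [c] := by
  simp [stepA, h]

theorem buildA_append (ds : List Char) (c : Char) :
    buildA (ds ++ [c]) = stepA (buildA ds) c := by
  simp [buildA, List.foldl_append]

theorem altLen_append (ds : List Char) (c : Char) :
    altLen (ds ++ [c]) =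
      if PySem.Chars.isdigit c then altLen ds * pyDigit c else altLen ds + 1 := by
  simp [altLen, List.foldl_append]

theorem length_flatten_replicate {α : Type} (n : Nat) (s : List α) :
    ((List.replicate n s).flatten).length = n * s.length := by
  induction n with
  | zero => simp
  | succ m ih => simp [List.replicate_succ, ih, Nat.succ_mul, Nat.add_comm]

theorem getD_flatten_replicate {α : Type} (n : Nat) (s : List α) (i : Nat) (d : α)
    (hi : i < n * s.length) :
    ((List.replicate n s).flatten).getD i d = s.getD (i % s.length) d := by
  induction n generalizing i with
  | zero => omega
  | succ m ih =>
    by_cases hs0 : s.length = 0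
    · rw [hs0, Nat.mul_zero] at hi; omega
    rw [Nat.succ_mul] at hi
    rw [List.replicate_succ, List.flatten_cons]
    by_cases h : i < s.length
    · rw [List.getD_append _ _ _ _ h, Nat.mod_eq_of_lt h]
    · have hle : s.length ≤ i := by omega
      rw [List.getD_append_right _ _ _ _ hle]
      rw [ih (i - s.length) (by omega)]
      rw [Nat.mod_eq_sub_mod hle]

-- on zero-free input the decoded length computed by B is the length of A's string
theorem lenA (cs : List Char) (hz : '0' ∉ cs) : ((buildA cs).length : Int) = altLen cs := by
  induction cs using List.reverseRecOn with
  | nil => simp [buildA, altLen]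
  | append_singleton ds c ih =>
    have hz' : '0' ∉ ds := fun h => hz (List.mem_append.mpr (Or.inl h))
    have hne : c ≠ '0' := fun h => hz (List.mem_append.mpr (Or.inr (by simp [h])))
    rw [buildA_append, altLen_append]
    by_cases h : PySem.Chars.isdigit c
    · obtain ⟨hm1, _⟩ := pyDigit_pos c h hne
      rw [stepA_digit _ _ h hne, if_pos h]
      rw [length_flatten_replicate]
      push_cast
      rw [Int.toNat_of_nonneg (by omega), ih hz']
      ring
    · rw [stepA_nondigit _ _ (by simpa using h), if_neg h]
      simp [← ih hz']

-- main invariant: B's backward pass reads off the i-th character of A's string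
theorem altGo_correct (cs : List Char) (hz : '0' ∉ cs) (idx : Int)
    (h0 : 0 ≤ idx) (h1 : idx < altLen cs) (d : Char) :
    altGo cs.reverse (altLen cs) idx = String.ofList [(buildA cs).getD idx.toNat d] := by
  induction cs using List.reverseRecOn generalizing idx with
  | nil => simp [altLen] at h1; omega
  | append_singleton ds c ih =>
    have hz' : '0' ∉ ds := fun h => hz (List.mem_append.mpr (Or.inl h))
    have hne : c ≠ '0' := fun h => hz (List.mem_append.mpr (Or.inr (by simp [h])))
    rw [List.reverse_append, List.reverse_singleton, List.singleton_append]
    rw [altLen_append] at h1 ⊢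
    by_cases h : PySem.Chars.isdigit c
    · obtain ⟨hm1, _⟩ := pyDigit_pos c h hne
      rw [if_pos h] at h1 ⊢
      set M : Int := pyDigit c with hM
      set L0 : Int := altLen ds with hL0
      have hL0pos : 0 < L0 := by
        rcases lt_or_ge 0 L0 with h' | h'
        · exact h'
        · exfalso
          have : L0 * M ≤ 0 := mul_nonpos_of_nonpos_of_nonneg (by omega) (by omega)
          omega
      have hdiv : PySem.Int.floordiv (L0 * M) M = L0 := by
        rw [PySem.Int.floordiv_eq_ediv_of_pos (by omega)]
        exact Int.mul_ediv_cancel L0 (by omega)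
      simp only [altGo, h, if_true]
      rw [← hM, hdiv]
      have hmod0 : 0 ≤ PySem.Int.mod idx L0 := PySem.Int.mod_nonneg idx hL0pos
      have hmod1 : PySem.Int.mod idx L0 < L0 := PySem.Int.mod_lt idx hL0pos
      rw [ih hz' _ hmod0 hmod1]
      congr 2
      rw [buildA_append, stepA_digit _ _ h hne]
      have hlen : (buildA ds).length = L0.toNat := by
        have := lenA ds hz'; omega
      have hidx : idx.toNat < M.toNat * (buildA ds).length := by
        have hml : idx < M * L0 := by rw [mul_comm] at h1; exact h1
        have hMn : ((M.toNat : Nat) : Int) = M := Int.toNat_of_nonneg (by omega)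
        have hLn : ((L0.toNat : Nat) : Int) = L0 := Int.toNat_of_nonneg (le_of_lt hL0pos)
        have hcast : ((M.toNat * L0.toNat : Nat) : Int) = M * L0 := by push_cast [hMn, hLn]; ring
        rw [hlen]
        omega
      rw [getD_flatten_replicate _ _ _ _ hidx]
      congr 1
      -- (mod idx L0).toNat = idx.toNat % L0.toNat
      have : PySem.Int.mod idx L0 = ((idx.toNat % L0.toNat : Nat) : Int) := by
        conv_lhs => rw [← Int.toNat_of_nonneg h0, ← Int.toNat_of_nonneg (le_of_lt hL0pos)]
        exact PySem.Int.mod_natCast _ _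
      rw [hlen, this]
      omega
    · rw [if_neg h] at h1 ⊢
      have hb : PySem.Chars.isdigit c = false := by simpa using h
      rw [buildA_append, stepA_nondigit _ _ hb]
      have hlen : ((buildA ds).length : Int) = altLen ds := lenA ds hz'
      simp only [altGo, hb, Bool.false_eq_true, if_false]
      by_cases he : idx = altLen ds + 1 - 1
      · rw [if_pos he]
        have : idx.toNat = (buildA ds).length := by omega
        rw [List.getD_append_right _ _ _ _ (by omega), this]
        simp
      · rw [if_neg he]
        have hlt : idx < altLen ds := by omega
        rw [show altLen ds + 1 - 1 = altLen ds by ring, ih hz' _ h0 hlt]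
        congr 2
        rw [List.getD_append _ _ _ _ (by omega)]

-- Python indexing new_str[k-1] as getD at the index (nonnegative here)
theorem pyGet?_eq_getD {α : Type} (xs : List α) (i : Int) (d : α)
    (hl : 0 ≤ i) (hr : i < xs.length) :
    PySem.List.pyGet? xs i = some (xs.getD i.toNat d) := by
  simp only [PySem.List.pyGet?, PySem.List.pyIdx?]
  rw [if_pos hl, if_pos hr]
  simp only [Option.bind_some]
  rw [List.getElem?_eq_getElem (by omega), List.getD_eq_getElem _ _ (by omega)]

-- ===== VERDICT (by name: the statement is the Claim_ definition above) =====
theorem decodeIt_spec : Claim_equal_decodeIt := by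
  intro Str k _hDom hPre
  obtain ⟨hz, hk1, hk2⟩ := hPre
  have hlen := lenA Str.toList hz
  unfold Spec_decodeIt
  simp only [decodeIt, decodeIt_alt]
  rw [pyGet?_eq_getD (buildA Str.toList) (k - 1) ' ' (by omega) (by omega)]
  rw [if_neg (show ¬ ¬ (1 ≤ k ∧ k ≤ altLen Str.toList) by simp; omega)]
  rw [altGo_correct Str.toList hz (k - 1) (by omega) (by omega) ' ']
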